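-- pv_equiv track=rewrite | github.com/MDMDMDMDMDMDMDMD/Finall | Final Project Maxat Dairov IT2-2211.py | generate_assembly_from_prefix
-- ===== SOURCE A (Python) =====
-- def generate_assembly_from_prefix(prefix_expression):
--     # Operators and their corresponding assembly commands
--     operators = {
--         '+': 'ADD',
--         '-': 'SUB',
--         '*': 'MUL',
--         '/': 'DIV'
--     }
--
--     # Split the input string into tokens
--     tokens = prefix_expression.split()
--
--     # Use a stack to process the tokens
--     stack = []
--
--     # Process tokens from right to left (characteristic of prefix notation)
--     for token in reversed(tokens):
--         if token in operators:
--             # If the token is an operator, pop two operands from the stack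
--             operand1 = stack.pop()
--             operand2 = stack.pop()
--             # Generate the assembly command
--             assembly = f"{operators[token]} {operand1}, {operand2}"
--             # Push the result back onto the stack
--             stack.append(assembly)
--         else:
--             # If the token is an operand (number), push it onto the stack
--             stack.append(token)
--
--     # The final result is the only element left in the stack
--     return stack[0]
-- ===== SOURCE B (Python) =====
-- def generate_assembly_from_prefix(prefix_expression):
--     operators = {
--         '+': 'ADD',
--         '-': 'SUB',
--         '*': 'MUL',
--         '/': 'DIV'
--     }
--     tokens = prefix_expression.split()
--     pos = 0
--
--     def parse():
--         nonlocal pos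
--         token = tokens[pos]
--         pos += 1
--         if token in operators:
--             left = parse()
--             right = parse()
--             return f"{operators[token]} {left}, {right}"
--         return token
--
--     result = parse()
--     if pos != len(tokens):
--         raise ValueError("unexpected extra tokens")
--     return result
-- ===== Notes on version B (the rewrite author's own statement) =====
-- stated objective: alternative
-- what changed: Replaces the explicit stack and right-to-left token loop with a recursive-descent parser that walks the tokens left-to-right and recurses on the nested expression structure; Pre_ excludes inputs whose token stream holds more than one complete prefix expression, where A's stack[0] pick of the rightmost one is accidental and B's parser rejects the leftover tokens.
-- outside the precondition, e.g. on generate_assembly_from_prefix('1 2'): A returns '2', B raises ValueError; on generate_assembly_from_prefix('* 1 2 3'): A returns '3', B raises ValueError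
import Mathlib
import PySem

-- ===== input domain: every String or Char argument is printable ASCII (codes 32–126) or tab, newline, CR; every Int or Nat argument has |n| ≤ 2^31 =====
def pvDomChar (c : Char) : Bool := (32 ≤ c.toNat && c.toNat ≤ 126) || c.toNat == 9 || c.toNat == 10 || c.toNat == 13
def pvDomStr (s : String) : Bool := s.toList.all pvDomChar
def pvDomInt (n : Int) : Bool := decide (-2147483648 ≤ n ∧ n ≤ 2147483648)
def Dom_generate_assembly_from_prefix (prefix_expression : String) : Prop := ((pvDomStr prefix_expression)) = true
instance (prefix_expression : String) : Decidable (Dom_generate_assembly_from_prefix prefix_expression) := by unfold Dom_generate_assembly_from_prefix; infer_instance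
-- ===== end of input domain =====

-- B replaces A's explicit stack and right-to-left loop by a recursive-descent parser
-- over the token list (alternative decomposition, same cost); equivalence is on the return value.

-- ===== PORT A =====
-- 'operators' dict: membership test and lookup combined (some = in the dict, with its value)
def opAsmA (t : String) : Option String :=
  if t = "+" then some "ADD"
  else if t = "-" then some "SUB"
  else if t = "*" then some "MUL"
  else if t = "/" then some "DIV" else none

-- one iteration of A's loop; stack top at the HEAD of the list (Python's stack[-1]);
-- none = a stack.pop() on an empty/1-element stack raised IndexError
def stepA (acc : Option (List String)) (token : String) : Option (List String) :=
  acc.bind fun stack =>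
    match opAsmA token with
    | some op =>
        match stack with
        | operand1 :: operand2 :: rest => some ((op ++ " " ++ operand1 ++ ", " ++ operand2) :: rest)
        | _ => none
    | none => some (token :: stack)

def generate_assembly_from_prefix (prefix_expression : String) : String :=
  let tokens := PySem.Str.split₀ prefix_expression
  match tokens.reverse.foldl stepA (some []) with
  | some stack => stack.getLast?.getD ""   -- Python stack[0] = bottom = last (head is the top); .getD "" = IndexError on [] (excluded by Pre_)
  | none => ""                             -- IndexError inside the loop (excluded by Pre_)

-- ===== PORT B =====
def opAsmB (t : String) : Option String :=
  if t = "+" then some "ADD"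
  else if t = "-" then some "SUB"
  else if t = "*" then some "MUL"
  else if t = "/" then some "DIV" else none

-- Source B's parse(): reads tokens[pos], advances, recurses for an operator's two operands.
-- Fuel (> number of remaining tokens at the top call) stands for Python's unbounded recursion;
-- none = IndexError (tokens exhausted; excluded by Pre_).
def parseB : Nat → List String → Option (String × List String)
  | 0, _ => none
  | _ + 1, [] => none
  | f + 1, token :: rest =>
    match opAsmB token with
    | some op =>
        match parseB f rest with
        | some (left, r1) =>
            match parseB f r1 with
            | some (right, r2) => some (op ++ " " ++ left ++ ", " ++ right, r2)
            | none => none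
        | none => none
    | none => some (token, rest)

def generate_assembly_from_prefix_alt (prefix_expression : String) : String :=
  let tokens := PySem.Str.split₀ prefix_expression
  match parseB (tokens.length + 1) tokens with
  | some (result, rest) =>
      if rest = [] then result
      else ""        -- ValueError: unexpected extra tokens (excluded by Pre_)
  | none => ""       -- IndexError in Python (excluded by Pre_)

-- ===== PRECONDITION & SPEC =====
-- token weight: -1 for an operator token, +1 for an operand
def wTok (t : String) : Int := if t = "+" ∨ t = "-" ∨ t = "*" ∨ t = "/" then -1 else 1
def cntTok (ts : List String) : Int := (ts.map wTok).sum

-- Pre_ excludes (a) inputs where A raises IndexError (empty token list, or an operator whose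
-- right context carries fewer than two parsed operands), and (b) inputs whose token stream holds
-- more than one complete prefix expression (signed token count ≠ 1): there A's stack[0] pick of
-- the rightmost expression is an accident of the stack and B's parser rejects the leftover tokens.
def Pre_generate_assembly_from_prefix (prefix_expression : String) : Prop :=
  PySem.Str.split₀ prefix_expression ≠ [] ∧
  cntTok (PySem.Str.split₀ prefix_expression) = 1 ∧
  ∀ i < (PySem.Str.split₀ prefix_expression).length,
    wTok ((PySem.Str.split₀ prefix_expression).getD i "") = -1 →
    2 ≤ cntTok ((PySem.Str.split₀ prefix_expression).drop (i + 1))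
instance (prefix_expression : String) : Decidable (Pre_generate_assembly_from_prefix prefix_expression) := by
  unfold Pre_generate_assembly_from_prefix; infer_instance

def pvWitness_generate_assembly_from_prefix : String := "+ * 1 2 3"

def Spec_generate_assembly_from_prefix (prefix_expression : String) (out : String) : Prop := out = generate_assembly_from_prefix_alt prefix_expression
instance (prefix_expression : String) (out : String) : Decidable (Spec_generate_assembly_from_prefix prefix_expression out) := by unfold Spec_generate_assembly_from_prefix; infer_instance

-- ===== CLAIM (what is proved, stated in full; the proofs are below) =====
def Claim_equal_generate_assembly_from_prefix : Prop := ∀ (prefix_expression : String), Dom_generate_assembly_from_prefix prefix_expression → Pre_generate_assembly_from_prefix prefix_expression → Spec_generate_assembly_from_prefix prefix_expression (generate_assembly_from_prefix prefix_expression)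

-- ===== LEMMAS AND PROOFS =====

-- parse always consumes at least one token
theorem parseB_rest_lt : ∀ (f : Nat) (ts : List String) {e : String} {r : List String},
    parseB f ts = some (e, r) → r.length < ts.length := by
  intro f
  induction f with
  | zero => intro ts e r h; simp [parseB] at h
  | succ f ih =>
    intro ts e r h
    cases ts with
    | nil => simp [parseB] at h
    | cons t rest =>
      simp only [parseB] at h
      cases hop : opAsmB t with
      | none =>
        simp only [hop, Option.some.injEq, Prod.mk.injEq] at h
        obtain ⟨-, hr⟩ := h; subst hr; simp
      | some op =>
        simp only [hop] at h
        cases h1 : parseB f rest with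
        | none => simp only [h1] at h; exact absurd h (by simp)
        | some p1 =>
          obtain ⟨l, r1⟩ := p1
          simp only [h1] at h
          cases h2 : parseB f r1 with
          | none => simp only [h2] at h; exact absurd h (by simp)
          | some p2 =>
            obtain ⟨rg, r2⟩ := p2
            simp only [h2, Option.some.injEq, Prod.mk.injEq] at h
            obtain ⟨-, hr⟩ := h; subst hr
            have hA := ih rest h1
            have hB := ih r1 h2
            simp only [List.length_cons]
            omega

-- A's loop, rephrased as a right fold (token processed given the stack of its right context)
def procR (ts : List String) : Option (List String) :=
  ts.foldr (fun t acc => stepA acc t) (some [])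

theorem wTok_none {t : String} (h : opAsmA t = none) : wTok t = 1 := by
  unfold opAsmA at h; unfold wTok
  split_ifs with hw
  · rcases hw with h1 | h1 | h1 | h1 <;> simp [h1] at h
  · rfl

theorem wTok_some {t : String} {op : String} (h : opAsmA t = some op) : wTok t = -1 := by
  unfold opAsmA at h; unfold wTok
  split_ifs with hw
  · rfl
  · push_neg at hw
    obtain ⟨h1, h2, h3, h4⟩ := hw
    simp [h1, h2, h3, h4] at h

theorem cntTok_cons (t : String) (ts : List String) : cntTok (t :: ts) = wTok t + cntTok ts := by
  simp [cntTok]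

theorem procR_cons (t : String) (ts : List String) :
    procR (t :: ts) = stepA (procR ts) t := rfl

-- under Pre_'s suffix condition, A's stack machine never underflows,
-- and the final stack size is the signed token count (nonempty for nonempty input)
theorem procR_ok : ∀ ts : List String,
    (∀ i < ts.length, wTok (ts.getD i "") = -1 → 2 ≤ cntTok (ts.drop (i + 1))) →
    ∃ st, procR ts = some st ∧ (st.length : Int) = cntTok ts ∧ (ts ≠ [] → st ≠ []) := by
  intro ts
  induction ts with
  | nil => intro _; exact ⟨[], rfl, by simp [cntTok], by simp⟩
  | cons t ts ih =>
    intro h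
    have hts : ∀ i < ts.length, wTok (ts.getD i "") = -1 → 2 ≤ cntTok (ts.drop (i + 1)) := by
      intro i hi hw
      have := h (i + 1) (by simp; omega) (by simpa using hw)
      simpa using this
    obtain ⟨st', hst', hlen, -⟩ := ih hts
    have hproc : procR (t :: ts) = stepA (some st') t := by
      rw [procR_cons, hst']
    cases hop : opAsmA t with
    | none =>
      refine ⟨t :: st', ?_, ?_, by simp⟩
      · rw [hproc]; simp [stepA, hop]
      · rw [cntTok_cons, wTok_none hop]; simp; omega
    | some op =>
      have h0 : 2 ≤ cntTok ts := by
        have := h 0 (by simp) (by simpa using wTok_some hop)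
        simpa using this
      have hlen2 : 2 ≤ st'.length := by exact_mod_cast hlen ▸ h0
      match st', hlen, hlen2 with
      | a :: b :: r, hlen, _ =>
        refine ⟨(op ++ " " ++ a ++ ", " ++ b) :: r, ?_, ?_, by simp⟩
        · rw [hproc]; simp [stepA, hop]
        · rw [cntTok_cons, wTok_some hop]; simp at hlen ⊢; omega

-- fuel monotonicity for the parser
theorem parseB_mono : ∀ (f f' : Nat) (ts : List String) (x : String × List String),
    f ≤ f' → parseB f ts = some x → parseB f' ts = some x := by
  intro f
  induction f with
  | zero => intro f' ts x _ h; simp [parseB] at h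
  | succ f ih =>
    intro f' ts x hle h
    obtain ⟨f'', rfl⟩ : ∃ f'', f' = f'' + 1 := ⟨f' - 1, by omega⟩
    have hle' : f ≤ f'' := by omega
    cases ts with
    | nil => simp [parseB] at h
    | cons t rest =>
      simp only [parseB] at h ⊢
      cases hop : opAsmB t with
      | none => simp only [hop] at h ⊢; exact h
      | some op =>
        simp only [hop] at h ⊢
        cases h1 : parseB f rest with
        | none => simp only [h1] at h; exact absurd h (by simp)
        | some p1 =>
          obtain ⟨l, r1⟩ := p1
          simp only [h1] at h
          cases h2 : parseB f r1 with
          | none => simp only [h2] at h; exact absurd h (by simp)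
          | some p2 =>
            obtain ⟨rg, r2⟩ := p2
            simp only [h2] at h
            simp only [ih f'' rest _ hle' h1, ih f'' r1 _ hle' h2]
            exact h

-- the sequence of complete expressions the parser would read off the token list, left to right
def chain : List String → Option (List String)
  | [] => some []
  | t :: rest =>
    match hp : parseB ((t :: rest).length + 1) (t :: rest) with
    | some (e, r) => (chain r).map (e :: ·)
    | none => none
termination_by ts => ts.length
decreasing_by
  have := parseB_rest_lt _ _ hp
  simpa using this

theorem chain_cons_some {t : String} {rest : List String} {e : String} {r : List String}
    (h : parseB ((t :: rest).length + 1) (t :: rest) = some (e, r)) :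
    chain (t :: rest) = (chain r).map (e :: ·) := by
  rw [chain]
  split
  · next e3 r3 heq =>
    rw [h] at heq
    simp only [Option.some.injEq, Prod.mk.injEq] at heq
    obtain ⟨rfl, rfl⟩ := heq
    rfl
  · next heq => rw [h] at heq; exact absurd heq (by simp)

theorem chain_cons_none {t : String} {rest : List String}
    (h : parseB ((t :: rest).length + 1) (t :: rest) = none) :
    chain (t :: rest) = none := by
  rw [chain]
  split
  · next e3 r3 heq => rw [h] at heq; exact absurd heq (by simp)
  · next heq => rfl

-- destructor for a successful chain on a nonempty list
theorem chain_elim {ts : List String} {es : List String}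
    (hne : ts ≠ []) (h : chain ts = some es) :
    ∃ e r es', parseB (ts.length + 1) ts = some (e, r) ∧ chain r = some es' ∧ es = e :: es' := by
  cases ts with
  | nil => exact absurd rfl hne
  | cons t rest =>
    cases hp : parseB ((t :: rest).length + 1) (t :: rest) with
    | none => rw [chain_cons_none hp] at h; exact absurd h (by simp)
    | some p =>
      obtain ⟨e, r⟩ := p
      rw [chain_cons_some hp] at h
      cases hc : chain r with
      | none => rw [hc] at h; exact absurd h (by simp)
      | some es' =>
        rw [hc] at h
        simp only [Option.map_some, Option.some.injEq] at h
        exact ⟨e, r, es', rfl, hc, h.symm⟩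

-- an empty chain means the token list itself was empty
theorem chain_nil {ts : List String} (h : chain ts = some []) : ts = [] := by
  cases ts with
  | nil => rfl
  | cons t rest =>
    obtain ⟨e, r, es', -, -, heq⟩ := chain_elim (by simp) h
    simp at heq

-- whenever A's stack machine succeeds, B's parser chain produces the same stack
theorem procR_chain : ∀ ts st, procR ts = some st → chain ts = some st := by
  intro ts
  induction ts with
  | nil => intro st h; simp only [procR, List.foldr_nil, Option.some.injEq] at h; rw [← h]; simp [chain]
  | cons t ts ih =>
    intro st h
    rw [procR_cons] at h
    cases hp : procR ts with
    | none => rw [hp] at h; simp [stepA] at h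
    | some st1 =>
    rw [hp] at h
    have hch : chain ts = some st1 := ih st1 hp
    cases hop : opAsmA t with
    | none =>
      have hst : st = t :: st1 := by
        simp [stepA, hop] at h; exact h.symm
      have hpb : parseB ((t :: ts).length + 1) (t :: ts) = some (t, ts) := by
        simp only [parseB, List.length_cons]
        rw [show opAsmB t = opAsmA t from rfl, hop]
      rw [chain_cons_some hpb, hch, hst]
      rfl
    | some op =>
      cases st1 with
      | nil => simp [stepA, hop] at h
      | cons a tl =>
      cases tl with
      | nil => simp [stepA, hop] at h
      | cons b r =>
        have hst : st = (op ++ " " ++ a ++ ", " ++ b) :: r := by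
          simp [stepA, hop] at h; exact h.symm
        have hne1 : ts ≠ [] := by
          intro hnil; rw [hnil] at hch; simp [chain] at hch
        obtain ⟨e1, r1, es1, hp1, hc1, heq1⟩ := chain_elim hne1 hch
        simp only [List.cons.injEq] at heq1
        obtain ⟨rfl, rfl⟩ := heq1
        have hne2 : r1 ≠ [] := by
          intro hnil; rw [hnil] at hc1; simp [chain] at hc1
        obtain ⟨e2, r2, es2, hp2, hc2, heq2⟩ := chain_elim hne2 hc1
        simp only [List.cons.injEq] at heq2
        obtain ⟨rfl, rfl⟩ := heq2
        have hr1lt : r1.length < ts.length := parseB_rest_lt _ _ hp1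
        have hp2' : parseB (ts.length + 1) r1 = some (b, r2) :=
          parseB_mono (r1.length + 1) (ts.length + 1) r1 (b, r2) (by omega) hp2
        have hpb : parseB ((t :: ts).length + 1) (t :: ts) =
            some (op ++ " " ++ a ++ ", " ++ b, r2) := by
          simp only [parseB, List.length_cons, show opAsmB t = opAsmA t from rfl, hop, hp1, hp2']
        rw [chain_cons_some hpb, hc2, hst]
        rfl

-- ===== VERDICT (by name: the statement is the Claim_ definition above) =====
theorem generate_assembly_from_prefix_spec : Claim_equal_generate_assembly_from_prefix := by
  intro s _ hpre
  obtain ⟨hne, hcnt, hsuf⟩ := hpre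
  obtain ⟨st, hproc, hlen, -⟩ := procR_ok _ hsuf
  have hchain : chain (PySem.Str.split₀ s) = some st := procR_chain _ _ hproc
  obtain ⟨e, r, es, hpb, hc, rfl⟩ := chain_elim hne hchain
  have hes : es = [] := by
    rw [hcnt] at hlen
    cases es with
    | nil => rfl
    | cons x xs => simp at hlen; omega
  subst hes
  have hr : r = [] := chain_nil hc
  subst hr
  unfold Spec_generate_assembly_from_prefix
  simp only [procR] at hproc
  simp [generate_assembly_from_prefix, generate_assembly_from_prefix_alt, hproc, hpb]
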